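-- pv_equiv track=rewrite | github.com/smkwray/fp-wraptr | scripts/support_gap_map.py | _parse_fminput_statements
-- ===== SOURCE A (Python) =====
-- def _parse_fminput_statements(lines: list[str]) -> list[tuple[int, str]]:
--     statements: list[tuple[int, str]] = []
--     current: list[str] = []
--     start_line = 0
--
--     for line_no, raw_line in enumerate(lines, start=1):
--         line = raw_line.rstrip("\n")
--         stripped = line.strip()
--         if not current and (not stripped or stripped.startswith("@")):
--             continue
--         if not current:
--             start_line = line_no
--         current.append(line)
--         if ";" in line:
--             statements.append((start_line, "\n".join(current)))
--             current = []
--             start_line = 0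
--
--     if current:
--         statements.append((start_line if start_line > 0 else len(lines), "\n".join(current)))
--     return statements
-- ===== SOURCE B (Python) =====
-- def _parse_fminput_statements(lines: list[str]) -> list[tuple[int, str]]:
--     # Segment-wise two-level scan: skip leading blank/@ lines, then take lines
--     # through the first ';'-line as one statement; repeat.
--     statements: list[tuple[int, str]] = []
--     i = 0
--     n = len(lines)
--     while i < n:
--         stripped = lines[i].rstrip("\n").strip()
--         if not stripped or stripped.startswith("@"):
--             i += 1
--             continue
--         chunk: list[str] = []
--         j = i
--         while j < n:
--             text = lines[j].rstrip("\n")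
--             chunk.append(text)
--             j += 1
--             if ";" in text:
--                 break
--         statements.append((i + 1, "\n".join(chunk)))
--         i = j
--     return statements
-- ===== Notes on version B (the rewrite author's own statement) =====
-- stated objective: alternative
-- what changed: A is one fold over enumerated lines with a mutable buffer/start-line state; B is a segment-wise two-level scan that skips leading blank/@ lines and then takes lines through the first ';'-line as one statement, with no carried buffer state.
import Mathlib
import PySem

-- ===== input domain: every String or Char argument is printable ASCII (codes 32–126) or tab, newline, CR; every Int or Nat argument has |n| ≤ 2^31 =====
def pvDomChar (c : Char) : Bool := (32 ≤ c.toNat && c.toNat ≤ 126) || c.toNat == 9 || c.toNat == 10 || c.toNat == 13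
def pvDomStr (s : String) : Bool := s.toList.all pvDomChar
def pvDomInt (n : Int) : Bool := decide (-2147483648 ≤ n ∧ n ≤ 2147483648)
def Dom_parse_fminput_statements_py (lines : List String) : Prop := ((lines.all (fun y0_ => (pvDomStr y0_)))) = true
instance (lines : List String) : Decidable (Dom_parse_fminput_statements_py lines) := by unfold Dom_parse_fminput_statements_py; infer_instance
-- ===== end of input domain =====

-- B replaces A's single fold with a buffer/start-line state by a segment-wise two-level scan
-- (skip leading blank/@ lines, take through the first ';'-line); objective: alternative decomposition.

-- hand port of Python s.rstrip("\n") (PySem has no chars-argument rstrip): drops trailing '\n'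
-- characters; exact for every string. Shared by both ports (both Pythons call the same built-in).
def pvRstripNL (s : String) : String :=
  String.ofList ((s.toList.reverse.dropWhile (fun c => c == '\n')).reverse)

-- ===== PORT A =====
-- the for-loop of A as structural recursion over enumerate(lines, 1) with A's exact state
-- (statements, current, start_line); n = len(lines) for the final `else len(lines)` branch.
def pvAGo (n : Int) : List (Int × String) → List (Int × String) → List String → Int → List (Int × String)
  | [], statements, current, start_line =>
      if current = [] then statements
      else statements ++ [((if start_line > 0 then start_line else n), PySem.Str.join "\n" current)]
  | (line_no, raw_line) :: rest, statements, current, start_line =>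
      let line := pvRstripNL raw_line
      let stripped := PySem.Str.strip line
      if current = [] ∧ (stripped = "" ∨ PySem.Str.startswith stripped "@" = true) then
        pvAGo n rest statements current start_line
      else
        let start_line' := if current = [] then line_no else start_line
        let current' := current ++ [line]
        if PySem.Str.isIn ";" line = true then
          pvAGo n rest (statements ++ [(start_line', PySem.Str.join "\n" current')]) [] 0
        else
          pvAGo n rest statements current' start_line'

def parse_fminput_statements_py (lines : List String) : List (Int × String) :=
  pvAGo (lines.length : Int) (PySem.List.enumerate lines 1) [] [] 0

-- ===== PORT B =====
-- Source B's inner while: rstripped lines through the first ';'-line, plus the remaining lines.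
def pvChunk : List String → List String × List String
  | [] => ([], [])
  | x :: xs =>
      let text := pvRstripNL x
      if PySem.Str.isIn ";" text = true then ([text], xs)
      else
        let p := pvChunk xs
        (text :: p.1, p.2)

theorem pvChunk_snd_le : ∀ (xs : List String), (pvChunk xs).2.length ≤ xs.length := by
  intro xs
  induction xs with
  | nil => simp [pvChunk]
  | cons x xs ih =>
      simp only [pvChunk]
      split
      · simp
      · simp only []
        have := ih
        simp
        omega

-- Source B's outer while loop: i is the 0-based index of the first remaining line.
def pvBGo : List String → Int → List (Int × String)
  | [], _ => []
  | x :: xs, i =>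
      let stripped := PySem.Str.strip (pvRstripNL x)
      if stripped = "" ∨ PySem.Str.startswith stripped "@" = true then
        pvBGo xs (i + 1)
      else
        let p := pvChunk (x :: xs)
        (i + 1, PySem.Str.join "\n" p.1) :: pvBGo p.2 (i + (p.1.length : Int))
  termination_by rest _ => rest.length
  decreasing_by
  · simp
  · have h : (pvChunk (x :: xs)).2.length ≤ xs.length := by
      simp only [pvChunk]
      split
      · simp
      · simpa using pvChunk_snd_le xs
    simp
    omega

def parse_fminput_statements_py_alt (lines : List String) : List (Int × String) :=
  pvBGo lines 0

-- ===== PRECONDITION & SPEC =====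
def Spec_parse_fminput_statements_py (lines : List String) (out : List (Int × String)) : Prop := out = parse_fminput_statements_py_alt lines
instance (lines : List String) (out : List (Int × String)) : Decidable (Spec_parse_fminput_statements_py lines out) := by unfold Spec_parse_fminput_statements_py; infer_instance

-- ===== CLAIM (what is proved, stated in full; the proofs are below) =====
def Claim_equal_parse_fminput_statements_py : Prop := ∀ (lines : List String), Dom_parse_fminput_statements_py lines → Spec_parse_fminput_statements_py lines (parse_fminput_statements_py lines)

-- ===== LEMMAS AND PROOFS =====

-- Joint invariant, by structural induction on the remaining lines:
-- (1) from an empty buffer, A's loop appends exactly B's output for the remaining lines;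
-- (2) from a nonempty buffer with positive start line, A's loop closes the buffer with the
--     current chunk and then continues as B does on the chunk's remainder.
theorem pvMain (n : Int) : ∀ (rest : List String),
    (∀ (i : Int) (stmts : List (Int × String)), 0 ≤ i →
      pvAGo n (PySem.List.enumerate rest (i + 1)) stmts [] 0 = stmts ++ pvBGo rest i) ∧
    (∀ (i : Int) (stmts : List (Int × String)) (cur : List String) (sl : Int),
      cur ≠ [] → 0 < sl → 0 ≤ i →
      pvAGo n (PySem.List.enumerate rest (i + 1)) stmts cur sl =
        stmts ++ (sl, PySem.Str.join "\n" (cur ++ (pvChunk rest).1)) ::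
          pvBGo (pvChunk rest).2 (i + ((pvChunk rest).1.length : Int))) := by
  intro rest
  induction rest with
  | nil =>
      constructor
      · intro i stmts _
        simp [PySem.List.enumerate_nil, pvAGo, pvBGo]
      · intro i stmts cur sl hcur hsl _
        simp only [PySem.List.enumerate_nil, pvAGo, pvChunk]
        rw [if_neg hcur, if_pos hsl]
        simp [pvBGo]
  | cons x xs ih =>
      obtain ⟨ihMain, ihChunk⟩ := ih
      constructor
      · -- Main, cons case
        intro i stmts hi
        rw [PySem.List.enumerate_cons]
        simp only [pvAGo]
        by_cases hskip : PySem.Str.strip (pvRstripNL x) = "" ∨ PySem.Str.startswith (PySem.Str.strip (pvRstripNL x)) "@" = true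
        · rw [if_pos ⟨trivial, hskip⟩]
          rw [ihMain (i + 1) stmts (by omega)]
          conv_rhs => rw [pvBGo]
          rw [if_pos hskip]
        · rw [if_neg (by simpa [not_or, Bool.not_eq_true] using hskip)]
          rw [if_pos trivial]
          simp only [List.nil_append]
          by_cases hsemi : PySem.Str.isIn ";" (pvRstripNL x) = true
          · rw [if_pos hsemi, ihMain (i + 1) _ (by omega)]
            conv_rhs => rw [pvBGo]
            rw [if_neg hskip]
            simp only [pvChunk, if_pos hsemi]
            simp
          · rw [if_neg hsemi]
            rw [ihChunk (i + 1) stmts [pvRstripNL x] (i + 1) (by simp) (by omega) (by omega)]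
            conv_rhs => rw [pvBGo]
            rw [if_neg hskip]
            simp only [pvChunk, if_neg hsemi]
            simp only [List.singleton_append, List.length_cons]
            rw [show (i + (((pvChunk xs).1.length + 1 : Nat) : Int)) = i + 1 + ((pvChunk xs).1.length : Int) from by push_cast; omega]
      · -- Chunk, cons case
        intro i stmts cur sl hcur hsl hi
        rw [PySem.List.enumerate_cons]
        simp only [pvAGo]
        rw [if_neg (by simp [hcur])]
        rw [if_neg hcur]
        by_cases hsemi : PySem.Str.isIn ";" (pvRstripNL x) = true
        · rw [if_pos hsemi, ihMain (i + 1) _ (by omega)]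
          simp only [pvChunk, if_pos hsemi]
          simp
        · rw [if_neg hsemi]
          rw [ihChunk (i + 1) stmts (cur ++ [pvRstripNL x]) sl (by simp) hsl (by omega)]
          simp only [pvChunk, if_neg hsemi]
          simp only [List.append_assoc, List.singleton_append, List.length_cons]
          rw [show (i + (((pvChunk xs).1.length + 1 : Nat) : Int)) = i + 1 + ((pvChunk xs).1.length : Int) from by push_cast; omega]

-- ===== VERDICT (by name: the statement is the Claim_ definition above) =====
theorem parse_fminput_statements_py_spec : Claim_equal_parse_fminput_statements_py := by
  intro lines _
  unfold Spec_parse_fminput_statements_py parse_fminput_statements_py parse_fminput_statements_py_alt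
  have h := (pvMain (lines.length : Int) lines).1 0 [] (by omega)
  simpa using h
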